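-- pv_equiv track=rewrite | github.com/chlewe/job-scheduling | scheduling.py | get_neighbours_arbitrary
-- ===== SOURCE A (Python) =====
-- def get_neighbours_arbitrary(schedule):
--     """ For a schedule, return all valid swaps of arbitrarily-placed operations that produce a valid schedule """
--     swaps = []
--     for i, (op, job_id) in enumerate(schedule):
--         forbidden_job_swaps = [job_id]
--         k = 1
--         while i+k < len(schedule):
--             _, swap_job_id = schedule[i + k]
--             if swap_job_id in forbidden_job_swaps:
--                 break
--             else:
--                 swaps.append(tuple((i, i + k)))
--                 forbidden_job_swaps.append(swap_job_id)
--             k += 1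
--     return swaps
-- ===== SOURCE B (Python) =====
-- def get_neighbours_arbitrary(schedule):
--     """ For a schedule, return all valid swaps of arbitrarily-placed operations that produce a valid schedule """
--     swaps = []
--     n = len(schedule)
--     seen = set()
--     r = 0
--     for i in range(n):
--         # extend the window [i, r) while the next job id is still fresh; r never resets
--         while r < n and schedule[r][1] not in seen:
--             seen.add(schedule[r][1])
--             r += 1
--         for j in range(i + 1, r):
--             swaps.append((i, j))
--         seen.discard(schedule[i][1])
--     return swaps
-- ===== Notes on version B (the rewrite author's own statement) =====
-- stated objective: faster
-- what changed: Replaces A's per-index restart scan (inner while re-scanning a growing forbidden list from scratch for every i) with a single two-pointer sliding window: a monotone, never-resetting right pointer r and a `seen` set updated by one add per extension and one discard per left step.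
import Mathlib
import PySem

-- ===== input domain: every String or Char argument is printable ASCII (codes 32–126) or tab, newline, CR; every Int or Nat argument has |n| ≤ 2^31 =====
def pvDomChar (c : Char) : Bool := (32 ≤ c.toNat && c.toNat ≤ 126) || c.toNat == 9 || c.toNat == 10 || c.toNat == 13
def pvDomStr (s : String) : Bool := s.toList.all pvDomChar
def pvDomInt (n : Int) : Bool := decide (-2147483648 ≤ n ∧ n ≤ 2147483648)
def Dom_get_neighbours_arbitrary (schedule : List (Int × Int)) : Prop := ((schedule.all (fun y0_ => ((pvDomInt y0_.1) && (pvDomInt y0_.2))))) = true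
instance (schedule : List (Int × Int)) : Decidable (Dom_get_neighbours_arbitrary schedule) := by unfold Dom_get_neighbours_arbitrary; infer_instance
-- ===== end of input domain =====

-- B replaces A's per-index restart scan by a single two-pointer sliding window with a
-- monotone right boundary and a `seen` set (objective: faster, O(n^2) worst case only from
-- output size; the scanning itself is O(n)).


-- ===== PORT A =====
-- A's inner while loop: `rest` is the suffix schedule[i+k:], `j` the running index i+k,
-- `forb` the forbidden_job_swaps list; appends (i, j) until a forbidden id or end of list.
def pvInnerA : List (Int × Int) → Int → Int → List Int → List (Int × Int)
  | [], _, _, _ => []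
  | (_, sj) :: rest, i, j, forb =>
      if forb.contains sj then []
      else (i, j) :: pvInnerA rest i (j + 1) (forb ++ [sj])

-- A's outer for loop over enumerate(schedule): `i` is the running index.
def pvOuterA : Nat → List (Int × Int) → List (Int × Int)
  | _, [] => []
  | i, (_, job) :: rest =>
      pvInnerA rest (i : Int) ((i : Int) + 1) [job] ++ pvOuterA (i + 1) rest

def get_neighbours_arbitrary (schedule : List (Int × Int)) : List (Int × Int) :=
  pvOuterA 0 schedule

-- ===== PORT B =====
-- B's `while r < n and schedule[r][1] not in seen: seen.add(...); r += 1`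
-- (index r into the fixed list l; l.getD is schedule[r], always in range since r < n).
def pvWhileB (l : List (Int × Int)) (n : Nat) (r : Nat) (seen : PySem.Set Int) :
    Nat × PySem.Set Int :=
  if _h : r < n then
    if PySem.Set.contains seen (l.getD r (0, 0)).2 then (r, seen)
    else pvWhileB l n (r + 1) (PySem.Set.add seen (l.getD r (0, 0)).2)
  else (r, seen)
  termination_by n - r

-- B's `for i in range(n)` loop; `for j in range(i+1, r)` is the range' block
-- (count r - (i+1), empty when r ≤ i+1, exactly Python's range(i+1, r)).
def pvOuterB (l : List (Int × Int)) (n : Nat) (i r : Nat) (seen : PySem.Set Int)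
    (acc : List (Int × Int)) : List (Int × Int) :=
  if _h : i < n then
    let p := pvWhileB l n r seen
    pvOuterB l n (i + 1) p.1 (PySem.Set.discard p.2 (l.getD i (0, 0)).2)
      (acc ++ (List.range' (i + 1) (p.1 - (i + 1))).map (fun j : Nat => ((i : Int), (j : Int))))
  else acc
  termination_by n - i

def get_neighbours_arbitrary_alt (schedule : List (Int × Int)) : List (Int × Int) :=
  pvOuterB schedule schedule.length 0 0 PySem.Set.empty []

-- ===== PRECONDITION & SPEC =====
def Spec_get_neighbours_arbitrary (schedule : List (Int × Int)) (out : List (Int × Int)) : Prop := out = get_neighbours_arbitrary_alt schedule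
instance (schedule : List (Int × Int)) (out : List (Int × Int)) : Decidable (Spec_get_neighbours_arbitrary schedule out) := by unfold Spec_get_neighbours_arbitrary; infer_instance

-- ===== CLAIM (what is proved, stated in full; the proofs are below) =====
def Claim_equal_get_neighbours_arbitrary : Prop := ∀ (schedule : List (Int × Int)), Dom_get_neighbours_arbitrary schedule → Spec_get_neighbours_arbitrary schedule (get_neighbours_arbitrary schedule)

-- ===== LEMMAS AND PROOFS =====

-- Length of the fresh (duplicate-free w.r.t. forb) prefix of ids in the suffix.
def pvFresh (forb : List Int) : List (Int × Int) → Nat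
  | [] => 0
  | (_, sj) :: rest => if forb.contains sj then 0 else pvFresh (forb ++ [sj]) rest + 1

-- Common specification: per-i block of pairs, concatenated.
def pvSpec : Nat → List (Int × Int) → List (Int × Int)
  | _, [] => []
  | i, (_, job) :: rest =>
      (List.range (pvFresh [job] rest)).map (fun t : Nat => ((i : Int), (i : Int) + 1 + (t : Int)))
        ++ pvSpec (i + 1) rest

lemma pvFresh_cons (forb : List Int) (x : Int × Int) (rest : List (Int × Int)) :
    pvFresh forb (x :: rest) =
      if forb.contains x.2 then 0 else pvFresh (forb ++ [x.2]) rest + 1 := by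
  cases x; rfl

lemma pvSpec_cons (i : Nat) (x : Int × Int) (rest : List (Int × Int)) :
    pvSpec i (x :: rest) =
      (List.range (pvFresh [x.2] rest)).map (fun t : Nat => ((i : Int), (i : Int) + 1 + (t : Int)))
        ++ pvSpec (i + 1) rest := by
  cases x; rfl

lemma pvInnerA_eq (i : Int) :
    ∀ (rest : List (Int × Int)) (j : Int) (forb : List Int),
      pvInnerA rest i j forb = (List.range (pvFresh forb rest)).map (fun t : Nat => (i, j + (t : Int)))
  | [], _, _ => rfl
  | (_, sj) :: rest, j, forb => by
      by_cases hc : sj ∈ forb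
      · have hc' : forb.contains sj = true := by simpa using hc
        simp [pvInnerA, pvFresh, hc]
      · have hc' : forb.contains sj = false := by simpa using hc
        rw [pvInnerA, pvFresh, hc']
        simp only [Bool.false_eq_true, if_false]
        rw [pvInnerA_eq i rest (j + 1) (forb ++ [sj])]
        rw [List.range_succ_eq_map, List.map_cons, List.map_map]
        refine congrArg₂ _ (by simp) (List.map_congr_left ?_)
        intro t _
        simp only [Function.comp_apply]
        have : ((t.succ : Nat) : Int) = (t : Int) + 1 := by push_cast; ring
        rw [this]
        ring_nf

lemma pvOuterA_eq : ∀ (l : List (Int × Int)) (i : Nat), pvOuterA i l = pvSpec i l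
  | [], _ => rfl
  | (_, job) :: rest, i => by
      rw [pvOuterA, pvSpec, pvInnerA_eq, pvOuterA_eq rest (i + 1)]

lemma pvFresh_le (forb : List Int) : ∀ (xs : List (Int × Int)), pvFresh forb xs ≤ xs.length := by
  intro xs
  induction xs generalizing forb with
  | nil => simp [pvFresh]
  | cons x rest ih =>
      rw [pvFresh]
      split
      · simp
      · simpa using ih (forb ++ [x.2])

lemma pvFresh_nodup : ∀ (xs : List (Int × Int)) (forb : List Int), forb.Nodup →
    (forb ++ ((xs.take (pvFresh forb xs)).map Prod.snd)).Nodup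
  | [], forb, h => by simpa [pvFresh] using h
  | (op, sj) :: rest, forb, h => by
      by_cases hc : sj ∈ forb
      · have hc' : forb.contains sj = true := by simpa using hc
        simpa [pvFresh, hc] using h
      · have hc' : forb.contains sj = false := by simpa using hc
        rw [pvFresh, hc']
        simp only [Bool.false_eq_true, if_false, List.take_succ_cons, List.map_cons]
        have hnd2 : (forb ++ [sj]).Nodup :=
          List.Nodup.append h (List.nodup_singleton sj)
            (by intro a ha hb; simp only [List.mem_singleton] at hb; exact hc (hb ▸ ha))
        have := pvFresh_nodup rest (forb ++ [sj]) hnd2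
        rw [← List.append_cons] at this
        exact this

lemma pvFresh_append : ∀ (p q : List (Int × Int)) (forb : List Int),
    (forb ++ p.map Prod.snd).Nodup →
    pvFresh forb (p ++ q) = p.length + pvFresh (forb ++ p.map Prod.snd) q
  | [], q, forb, _ => by simp
  | (op, sj) :: p, q, forb, h => by
      have hnotin : sj ∉ forb := by
        intro hmem
        exact (List.disjoint_of_nodup_append h) hmem (by simp)
      have hc : forb.contains sj = false := by simpa using hnotin
      rw [List.cons_append, pvFresh, hc]
      simp only [Bool.false_eq_true, if_false]
      have h' : ((forb ++ [sj]) ++ p.map Prod.snd).Nodup := by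
        rw [List.map_cons, List.append_cons forb sj (p.map Prod.snd)] at h
        exact h
      rw [pvFresh_append p q (forb ++ [sj]) h']
      rw [List.map_cons, ← List.append_cons]
      simp only [List.length_cons]
      omega

lemma pvWhileB_eq (l : List (Int × Int)) (r : Nat) (seen forb : List Int)
    (hr : r ≤ l.length) (hs : ∀ x, x ∈ seen ↔ x ∈ forb) :
    (pvWhileB l l.length r seen).1 = r + pvFresh forb (l.drop r) ∧
    (∀ x, x ∈ (pvWhileB l l.length r seen).2 ↔
      x ∈ forb ++ (((l.drop r).take (pvFresh forb (l.drop r))).map Prod.snd)) := by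
  rw [pvWhileB]
  by_cases h : r < l.length
  · simp only [h, dif_pos]
    have hdrop : l.drop r = l[r] :: l.drop (r + 1) := List.drop_eq_getElem_cons h
    have hget : l.getD r (0, 0) = l[r] := List.getD_eq_getElem l (0, 0) h
    have hcs : PySem.Set.contains seen (l.getD r (0, 0)).2 = forb.contains l[r].2 := by
      rw [hget]
      by_cases hm : l[r].2 ∈ forb
      · have : l[r].2 ∈ seen := (hs _).mpr hm
        rw [(PySem.Set.contains_iff seen l[r].2).mpr this]
        simpa using hm
      · have : l[r].2 ∉ seen := fun hx => hm ((hs _).mp hx)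
        have h1 : PySem.Set.contains seen l[r].2 = false := by
          cases hb : PySem.Set.contains seen l[r].2
          · rfl
          · exact absurd ((PySem.Set.contains_iff seen l[r].2).mp hb) this
        rw [h1]
        symm
        simpa using hm
    rw [hcs]
    by_cases hcb : forb.contains l[r].2 = true
    · rw [if_pos hcb]
      constructor
      · rw [hdrop, pvFresh_cons, hcb]
        simp
      · intro x
        rw [hdrop, pvFresh_cons, hcb]
        simpa using hs x
    · have hcb' : forb.contains l[r].2 = false := by
        cases hb : forb.contains l[r].2
        · rfl
        · exact absurd hb hcb
      rw [if_neg hcb]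
      have hs' : ∀ x, x ∈ PySem.Set.add seen (l.getD r (0, 0)).2 ↔ x ∈ forb ++ [l[r].2] := by
        intro x
        rw [hget, PySem.Set.mem_add]
        simp only [List.mem_append, List.mem_singleton]
        rw [hs x]
      obtain ⟨h1, h2⟩ := pvWhileB_eq l (r + 1) (PySem.Set.add seen (l.getD r (0, 0)).2)
        (forb ++ [l[r].2]) h hs'
      constructor
      · rw [h1, hdrop, pvFresh_cons, hcb']
        simp only [Bool.false_eq_true, if_false]
        omega
      · intro x
        rw [h2 x, hdrop, pvFresh_cons, hcb']
        simp only [Bool.false_eq_true, if_false, List.take_succ_cons, List.map_cons,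
          List.mem_append, List.mem_cons]
        tauto
  · simp only [h, dif_neg, not_false_iff]
    have : r = l.length := le_antisymm hr (Nat.le_of_not_lt h)
    subst this
    simp [pvFresh, hs]
termination_by l.length - r

lemma pvOuterB_eq (l : List (Int × Int)) (i r : Nat) (seen : PySem.Set Int)
    (acc : List (Int × Int))
    (hir : i ≤ r) (hr : r ≤ l.length)
    (hs : ∀ x, x ∈ seen ↔ x ∈ ((l.drop i).take (r - i)).map Prod.snd)
    (hnd : (((l.drop i).take (r - i)).map Prod.snd).Nodup) :
    pvOuterB l l.length i r seen acc = acc ++ pvSpec i (l.drop i) := by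
  rw [pvOuterB]
  by_cases h : i < l.length
  · simp only [h, dif_pos]
    obtain ⟨h1, h2⟩ := pvWhileB_eq l r seen (((l.drop i).take (r - i)).map Prod.snd) hr hs
    have hdropi : l.drop i = l[i] :: l.drop (i + 1) := List.drop_eq_getElem_cons h
    have hgeti : l.getD i (0, 0) = l[i] := List.getD_eq_getElem l (0, 0) h
    have hsplit : l.drop i = (l.drop i).take (r - i) ++ l.drop r := by
      have hri : i + (r - i) = r := by omega
      conv_lhs => rw [← List.take_append_drop (r - i) (l.drop i)]
      rw [List.drop_drop, hri]
    have hlen : ((l.drop i).take (r - i)).length = r - i := by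
      rw [List.length_take, List.length_drop]; omega
    have hbig : pvFresh [] (l.drop i) = (r - i) + pvFresh (((l.drop i).take (r - i)).map Prod.snd) (l.drop r) := by
      conv_lhs => rw [hsplit]
      rw [pvFresh_append _ _ [] (by simpa using hnd)]
      rw [List.nil_append, hlen]
    have hhead : pvFresh [] (l.drop i) = pvFresh [l[i].2] (l.drop (i + 1)) + 1 := by
      rw [hdropi, pvFresh_cons]
      simp
    have hrval : (pvWhileB l l.length r seen).1 = i + 1 + pvFresh [l[i].2] (l.drop (i + 1)) := by
      rw [h1]; omega
    have hmle : pvFresh [l[i].2] (l.drop (i + 1)) ≤ l.length - (i + 1) := by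
      have hle := pvFresh_le [l[i].2] (l.drop (i + 1))
      rwa [List.length_drop] at hle
    have hrle : (pvWhileB l l.length r seen).1 ≤ l.length := by
      rw [hrval]; omega
    have hwin : (l.drop i).take (1 + pvFresh [l[i].2] (l.drop (i + 1))) =
        l[i] :: (l.drop (i + 1)).take (pvFresh [l[i].2] (l.drop (i + 1))) := by
      have hcm : 1 + pvFresh [l[i].2] (l.drop (i + 1)) = pvFresh [l[i].2] (l.drop (i + 1)) + 1 := Nat.add_comm 1 _
      rw [hdropi, hcm, List.take_succ_cons]
    have hfull : ∀ x, x ∈ (pvWhileB l l.length r seen).2 ↔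
        x ∈ ((l.drop i).take (1 + pvFresh [l[i].2] (l.drop (i + 1)))).map Prod.snd := by
      intro x
      rw [h2 x]
      conv_rhs => rw [hsplit]
      rw [List.take_append, hlen]
      have e1 : ((l.drop i).take (r - i)).take (1 + pvFresh [l[i].2] (l.drop (i + 1))) = (l.drop i).take (r - i) :=
        List.take_of_length_le (by rw [hlen]; omega)
      have e2 : 1 + pvFresh [l[i].2] (l.drop (i + 1)) - (r - i) = pvFresh (((l.drop i).take (r - i)).map Prod.snd) (l.drop r) := by omega
      rw [e1, e2]
      simp only [List.map_append, List.mem_append]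
    have hfullnd : (((l.drop i).take (1 + pvFresh [l[i].2] (l.drop (i + 1)))).map Prod.snd).Nodup := by
      have hnd0 := pvFresh_nodup (l.drop i) [] List.nodup_nil
      rw [List.nil_append] at hnd0
      have he : pvFresh [] (l.drop i) = 1 + pvFresh [l[i].2] (l.drop (i + 1)) := by omega
      rwa [he] at hnd0
    have hfc : l[i].2 ∉ ((l.drop (i + 1)).take (pvFresh [l[i].2] (l.drop (i + 1)))).map Prod.snd ∧
        (((l.drop (i + 1)).take (pvFresh [l[i].2] (l.drop (i + 1)))).map Prod.snd).Nodup := by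
      rw [hwin] at hfullnd
      simpa only [List.map_cons, List.nodup_cons] using hfullnd
    have hs' : ∀ x, x ∈ PySem.Set.discard (pvWhileB l l.length r seen).2 (l.getD i (0, 0)).2 ↔
        x ∈ ((l.drop (i + 1)).take ((pvWhileB l l.length r seen).1 - (i + 1))).map Prod.snd := by
      intro x
      rw [PySem.Set.mem_discard, hfull x, hgeti, hrval]
      have hsub : i + 1 + pvFresh [l[i].2] (l.drop (i + 1)) - (i + 1) = pvFresh [l[i].2] (l.drop (i + 1)) := by omega
      rw [hsub, hwin]
      simp only [List.map_cons, List.mem_cons]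
      constructor
      · rintro ⟨ha | ha, hb⟩
        · exact absurd ha hb
        · exact ha
      · intro hx
        exact ⟨Or.inr hx, fun he => hfc.1 (he ▸ hx)⟩
    have hnd' : (((l.drop (i + 1)).take ((pvWhileB l l.length r seen).1 - (i + 1))).map Prod.snd).Nodup := by
      rw [hrval]
      have hsub : i + 1 + pvFresh [l[i].2] (l.drop (i + 1)) - (i + 1) = pvFresh [l[i].2] (l.drop (i + 1)) := by omega
      rw [hsub]
      exact hfc.2
    rw [pvOuterB_eq l (i + 1) (pvWhileB l l.length r seen).1 _ _ (by omega) hrle hs' hnd']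
    conv_rhs => rw [hdropi]
    rw [pvSpec_cons, List.append_assoc]
    congr 1
    congr 1
    rw [hrval]
    have hsub : i + 1 + pvFresh [l[i].2] (l.drop (i + 1)) - (i + 1) = pvFresh [l[i].2] (l.drop (i + 1)) := by omega
    rw [hsub, List.range'_eq_map_range, List.map_map]
    apply List.map_congr_left
    intro t _
    simp only [Function.comp_apply]
    have hct : ((i + 1 + t : Nat) : Int) = (i : Int) + 1 + (t : Int) := by push_cast; ring
    rw [hct]
  · simp only [h, dif_neg, not_false_iff]
    have : i = l.length := by omega
    subst this
    simp [pvSpec]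
termination_by l.length - i

-- ===== VERDICT (by name: the statement is the Claim_ definition above) =====
theorem get_neighbours_arbitrary_spec : Claim_equal_get_neighbours_arbitrary := by
  intro schedule _
  unfold Spec_get_neighbours_arbitrary get_neighbours_arbitrary get_neighbours_arbitrary_alt
  rw [pvOuterB_eq schedule 0 0 PySem.Set.empty [] (Nat.le_refl 0) (Nat.zero_le _)
      (by simp [PySem.Set.empty]) (by simp)]
  rw [List.nil_append, List.drop_zero, pvOuterA_eq]
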